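-- pv_equiv track=rewrite | github.com/gabriellima77/Projeto-Sat-Solver | p.py | mudancadevalor
-- ===== SOURCE A (Python) =====
-- def mudancadevalor(variavel, a, s):
--     r = 0
--     while(r < s):
--         variavel.append(0)
--         r += 1
--     var = bin(a)
--     n = len(var)
--     y = n -1
--     s = len(variavel) - 1
--     r = 0
--     while(var[y] != 'b'):
--         variavel[s] = int(var[y])
--         s -= 1
--         y -= 1
--     return variavel
-- ===== SOURCE B (Python) =====
-- def mudancadevalor(variavel, a, s):
--     # Returns a new list (A mutates `variavel` in place; equivalence is about the return value).
--     padded = variavel + [0] * max(s, 0)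
--     m = abs(a)
--     bits = []
--     while m:
--         bits.append(m & 1)
--         m >>= 1
--     digits = bits[::-1] or [0]
--     return padded[:max(len(padded) - len(digits), 0)] + digits
-- ===== Notes on version B (the rewrite author's own statement) =====
-- stated objective: simpler
-- what changed: B extracts binary digits by arithmetic (m&1, m>>=1) and builds the result as prefix-plus-digits instead of scanning the bin() string backwards and writing into the list by decreasing index; A mutates variavel in place while B returns a new list, so the equivalence is about the return value only.
-- intended difference: When |a| has more binary digits than the padded list has slots (|a| >= 2^(len(variavel)+max(s,0))) but few enough that A does not crash, A's decreasing index goes negative and Python's negative-index wraparound makes the high bits overwrite the digits just written (e.g. A([0],2,0) returns [1]); B instead returns the full binary digit string ([1,0]), which is the intended value. — e.g. on mudancadevalor([0], 2, 0): A returns [1], B returns [1, 0]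
import Mathlib
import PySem

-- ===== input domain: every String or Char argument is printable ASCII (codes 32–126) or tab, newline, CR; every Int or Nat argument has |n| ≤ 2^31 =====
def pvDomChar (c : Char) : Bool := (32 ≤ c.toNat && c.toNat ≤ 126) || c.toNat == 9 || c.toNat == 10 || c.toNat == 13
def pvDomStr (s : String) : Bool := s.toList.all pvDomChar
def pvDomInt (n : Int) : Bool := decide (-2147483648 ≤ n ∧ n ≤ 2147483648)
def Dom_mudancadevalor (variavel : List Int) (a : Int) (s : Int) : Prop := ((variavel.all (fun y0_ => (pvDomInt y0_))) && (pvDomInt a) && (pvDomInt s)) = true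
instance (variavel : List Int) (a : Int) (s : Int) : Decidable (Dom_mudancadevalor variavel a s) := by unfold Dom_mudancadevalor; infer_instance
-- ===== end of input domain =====

-- B replaces A's backwards scan of the bin() string (written into the list by a
-- decreasing, possibly wrapping index) with arithmetic bit extraction and a
-- prefix-plus-digits construction.  A mutates `variavel` in place, B returns a
-- new list: the equivalence proved here is about the RETURN value only.

-- ===== PORT A =====
-- while(r < s): variavel.append(0); r += 1   (runs max(s,0) times; counter n = s - r)
def pvPadLoopA (v : List Int) (n : Nat) : List Int :=
  match n with
  | 0 => v
  | n + 1 => pvPadLoopA (v ++ [0]) n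

-- binary digit characters of n (MSB first), [] for 0 — helper for bin().
-- fuel-structured (fuel ≥ n suffices) so the kernel can reduce it.
def pvBinCore (fuel : Nat) (n : Nat) : List Char :=
  match fuel with
  | 0 => []
  | fuel + 1 =>
    if n = 0 then [] else pvBinCore fuel (n / 2) ++ [if n % 2 = 1 then '1' else '0']

-- bin(a): exact port of Python's built-in bin() as a char list
def pvBin (a : Int) : List Char :=
  (if a < 0 then ['-', '0', 'b'] else ['0', 'b']) ++
    (if a = 0 then ['0'] else pvBinCore a.natAbs a.natAbs)

-- int(var[y]) where var[y] is a binary digit character ('0' or '1'): exact on those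
def pvDigit (c : Char) : Int := if c = '1' then 1 else 0

-- while(var[y] != 'b'): variavel[s] = int(var[y]); s -= 1; y -= 1
-- none = IndexError (variavel[s] out of range).  The y = 0 fall-through is
-- unreachable: a bin() string always has 'b' at index 1 or 2, so the downward scan
-- stops at 'b' before reaching index 0.
def pvWriteLoopA (v : List Int) (var : List Char) (y : Nat) (s : Int) : Option (List Int) :=
  match PySem.List.pyGet? var (y : Int) with
  | none => none
  | some c =>
    if c = 'b' then some v
    else
      match PySem.List.pySet? v s (pvDigit c) with
      | none => none
      | some v' =>
        match y with
        | 0 => none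
        | y' + 1 => pvWriteLoopA v' var y' (s - 1)

def mudancadevalor (variavel : List Int) (a : Int) (s : Int) : List Int :=
  let v := pvPadLoopA variavel s.toNat
  let var := pvBin a
  ((pvWriteLoopA v var (var.length - 1) ((v.length : Int) - 1)).getD [])

-- ===== PORT B =====
-- while m: bits.append(m & 1); m >>= 1   (LSB first; m ≥ 0, so m & 1 = m % 2;
-- fuel-structured, fuel ≥ m suffices, so the kernel can reduce it)
def pvBitsLSB (fuel : Nat) (m : Nat) : List Int :=
  match fuel with
  | 0 => []
  | fuel + 1 => if m = 0 then [] else ((m % 2 : Nat) : Int) :: pvBitsLSB fuel (m / 2)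

def mudancadevalor_alt (variavel : List Int) (a : Int) (s : Int) : List Int :=
  let padded := variavel ++ List.replicate s.toNat 0      -- variavel + [0]*max(s,0)
  let bits := pvBitsLSB a.natAbs a.natAbs
  let digits := if bits.reverse = [] then [0] else bits.reverse   -- bits[::-1] or [0]
  padded.take (padded.length - digits.length) ++ digits   -- padded[:max(len-k,0)] + digits

-- ===== PRECONDITION & SPEC =====
-- Pre_ excludes exactly the inputs on which A raises IndexError: |a| needs more than
-- twice as many binary digits as the padded list has slots (the decreasing index
-- falls below -len), i.e. |a| ≥ 4^(len(variavel)+max(s,0)), or a = 0 with an empty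
-- padded list.
def Pre_mudancadevalor (variavel : List Int) (a : Int) (s : Int) : Prop :=
  (a = 0 → 0 < variavel.length + s.toNat) ∧ a.natAbs < 4 ^ (variavel.length + s.toNat)
instance (variavel : List Int) (a : Int) (s : Int) : Decidable (Pre_mudancadevalor variavel a s) := by unfold Pre_mudancadevalor; infer_instance

def pvWitness_mudancadevalor : List Int × Int × Int := ([7, -2], 5, 1)

-- When |a| has more binary digits than the padded list has slots (|a| ≥
-- 2^(len(variavel)+max(s,0))) but A does not crash, A's decreasing index goes
-- negative and Python's negative-index wraparound makes the high bits overwrite the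
-- digits just written (A([0],2,0) = [1]); B returns the full binary digit string
-- ([1,0]), the intended value.
def D_mudancadevalor (variavel : List Int) (a : Int) (s : Int) : Prop :=
  2 ^ (variavel.length + s.toNat) ≤ a.natAbs
instance (variavel : List Int) (a : Int) (s : Int) : Decidable (D_mudancadevalor variavel a s) := by unfold D_mudancadevalor; infer_instance

def Spec_mudancadevalor (variavel : List Int) (a : Int) (s : Int) (out : List Int) : Prop := ¬ D_mudancadevalor variavel a s → out = mudancadevalor_alt variavel a s
instance (variavel : List Int) (a : Int) (s : Int) (out : List Int) : Decidable (Spec_mudancadevalor variavel a s out) := by unfold Spec_mudancadevalor; infer_instance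

def pvDiffWitness_mudancadevalor : List Int × Int × Int := ([0], 2, 0)
def pvDiffWitnessOut_mudancadevalor : (List Int) × (List Int) := ([1], [1, 0])

-- ===== CLAIM (what is proved, stated in full; the proofs are below) =====
def Claim_unchanged_mudancadevalor : Prop := ∀ (variavel : List Int) (a : Int) (s : Int), Dom_mudancadevalor variavel a s → Pre_mudancadevalor variavel a s → Spec_mudancadevalor variavel a s (mudancadevalor variavel a s)
def Claim_changed_mudancadevalor : Prop := Dom_mudancadevalor (pvDiffWitness_mudancadevalor.1) (pvDiffWitness_mudancadevalor.2.1) (pvDiffWitness_mudancadevalor.2.2) ∧ Pre_mudancadevalor (pvDiffWitness_mudancadevalor.1) (pvDiffWitness_mudancadevalor.2.1) (pvDiffWitness_mudancadevalor.2.2) ∧ D_mudancadevalor (pvDiffWitness_mudancadevalor.1) (pvDiffWitness_mudancadevalor.2.1) (pvDiffWitness_mudancadevalor.2.2) ∧ mudancadevalor (pvDiffWitness_mudancadevalor.1) (pvDiffWitness_mudancadevalor.2.1) (pvDiffWitness_mudancadevalor.2.2) = pvDiffWitnessOut_mudancadevalor.1 ∧ mudancadevalor_alt (pvDiffWitness_mudancadevalor.1)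 (pvDiffWitness_mudancadevalor.2.1) (pvDiffWitness_mudancadevalor.2.2) = pvDiffWitnessOut_mudancadevalor.2 ∧ pvDiffWitnessOut_mudancadevalor.1 ≠ pvDiffWitnessOut_mudancadevalor.2
def Claim_exact_mudancadevalor : Prop := ∀ (variavel : List Int) (a : Int) (s : Int), Dom_mudancadevalor variavel a s → Pre_mudancadevalor variavel a s → D_mudancadevalor variavel a s → mudancadevalor variavel a s ≠ mudancadevalor_alt variavel a s

-- ===== LEMMAS AND PROOFS =====

lemma pySet?_length {xs v' : List Int} {i : Int} {x : Int}
    (h : PySem.List.pySet? xs i x = some v') : v'.length = xs.length := by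
  have := PySem.List.length_pySetD xs i x
  simp [PySem.List.pySetD, h] at this
  omega

lemma pvWriteLoopA_main (pre cs suf : List Char) (v : List Int) (j : Int)
    (hlen : (cs.length : Int) ≤ j + 1) (hj : j < (v.length : Int)) (hb : 'b' ∉ cs) :
    pvWriteLoopA v (pre ++ 'b' :: (cs ++ suf)) (pre.length + cs.length) j
      = some (v.take (j + 1 - cs.length).toNat ++ cs.map pvDigit ++ v.drop (j + 1).toNat) := by
  induction cs using List.reverseRecOn generalizing suf v j with
  | nil =>
    rw [pvWriteLoopA]
    have hg : PySem.List.pyGet? (pre ++ 'b' :: ([] ++ suf)) ((pre.length + ([] : List Char).length : Nat) : Int) = some 'b' := by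
      have h := PySem.List.pyGet?_append_length (pre := pre) (y := 'b') (ys := suf)
      simp only [List.nil_append, List.length_nil, Nat.add_zero]
      exact h
    rw [hg]
    simp
  | append_singleton ds c ih =>
    simp only [List.mem_append, List.mem_singleton, not_or] at hb
    have hcb : c ≠ 'b' := fun h => hb.2 h.symm
    have hdb : 'b' ∉ ds := hb.1
    rw [pvWriteLoopA]
    have hshape : pre ++ 'b' :: ((ds ++ [c]) ++ suf) = (pre ++ 'b' :: ds) ++ c :: suf := by simp
    have hy : (pre.length + (ds ++ [c]).length : Nat) = (pre ++ 'b' :: ds).length := by simp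
    have hg : PySem.List.pyGet? (pre ++ 'b' :: ((ds ++ [c]) ++ suf)) ((pre.length + (ds ++ [c]).length : Nat) : Int) = some c := by
      rw [hshape, hy]
      exact PySem.List.pyGet?_append_length (pre := pre ++ 'b' :: ds) (y := c) (ys := suf)
    rw [hg]
    simp only [if_neg hcb]
    have hj0 : 0 ≤ j := by simp at hlen; omega
    obtain ⟨m, rfl⟩ : ∃ m : Nat, j = (m : Int) := ⟨j.toNat, by omega⟩
    have hm : m < v.length := by exact_mod_cast hj
    have hset : PySem.List.pySet? v (m : Int) (pvDigit c) = some (v.set m (pvDigit c)) :=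
      PySem.List.pySet?_natCast v m (pvDigit c) hm
    simp only [hset]
    have hy2 : (pre.length + (ds ++ [c]).length : Nat) = (pre.length + ds.length) + 1 := by simp [Nat.add_assoc]
    rw [hy2]
    have hrec := ih (c :: suf) (v.set m (pvDigit c)) ((m : Int) - 1)
      (by simp at hlen ⊢; omega) (by simp; omega) hdb
    simp only [List.append_assoc, List.cons_append, List.nil_append] at hrec ⊢
    rw [hrec]
    congr 1
    have h1 : ((m : Int) - 1 + 1 - (ds.length : Int)).toNat = m - ds.length := by omega
    have h2 : ((m : Int) - 1 + 1).toNat = m := by omega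
    have h3 : ((m : Int) + 1 - ((ds ++ [c]).length : Int)).toNat = m - ds.length := by simp only [List.length_append, List.length_singleton]; push_cast; omega
    have h4 : ((m : Int) + 1).toNat = m + 1 := by omega
    rw [h1, h2, h3, h4]
    rw [List.take_set_of_le (by omega)]
    have hdrop : (v.set m (pvDigit c)).drop m = pvDigit c :: v.drop (m + 1) := by
      rw [List.drop_set, if_neg (lt_irrefl m), Nat.sub_self,
        List.drop_eq_getElem_cons hm, List.set_cons_zero]
    rw [hdrop]
    simp

lemma pvWriteLoopA_length {v : List Int} {var : List Char} {y : Nat} {s : Int} {w : List Int}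
    (h : pvWriteLoopA v var y s = some w) : w.length = v.length := by
  induction y generalizing v s w with
  | zero =>
    rw [pvWriteLoopA] at h
    rcases hg : PySem.List.pyGet? var ((0:Nat):Int) with _ | c <;> rw [hg] at h
    · exact absurd h (by simp)
    · by_cases hc : c = 'b'
      · simp only [if_pos hc] at h; cases h; rfl
      · simp only [if_neg hc] at h
        rcases hs : PySem.List.pySet? v s (pvDigit c) with _ | v' <;> simp only [hs] at h <;> simp at h
  | succ y ih =>
    rw [pvWriteLoopA] at h
    rcases hg : PySem.List.pyGet? var ((y+1:Nat):Int) with _ | c <;> rw [hg] at h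
    · exact absurd h (by simp)
    · by_cases hc : c = 'b'
      · simp only [if_pos hc] at h; cases h; rfl
      · simp only [if_neg hc] at h
        rcases hs : PySem.List.pySet? v s (pvDigit c) with _ | v' <;> simp only [hs] at h
        · simp at h
        · have := ih h
          rw [this, pySet?_length hs]

lemma pvPadLoopA_eq (v : List Int) (n : Nat) :
    pvPadLoopA v n = v ++ List.replicate n 0 := by
  induction n generalizing v with
  | zero => simp [pvPadLoopA]
  | succ n ih => simp [pvPadLoopA, ih, List.replicate_succ]

lemma pvBitsLSB_reverse (f n : Nat) (h : n ≤ f) :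
    (pvBitsLSB f n).reverse = (pvBinCore f n).map pvDigit := by
  induction f generalizing n with
  | zero => simp [pvBitsLSB, pvBinCore]
  | succ f ih =>
    by_cases h0 : n = 0
    · simp [pvBitsLSB, pvBinCore, h0]
    · rw [pvBitsLSB, pvBinCore, if_neg h0, if_neg h0]
      rw [List.reverse_cons, ih (n / 2) (by omega), List.map_append]
      congr 1
      simp only [List.map_cons, List.map_nil, pvDigit]
      have : n % 2 = 0 ∨ n % 2 = 1 := by omega
      rcases this with h2 | h2 <;> simp [h2]

lemma pvBinCore_length_le {f n L : Nat} (hf : n ≤ f) (h : n < 2 ^ L) :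
    (pvBinCore f n).length ≤ L := by
  induction f generalizing n L with
  | zero => simp [pvBinCore]
  | succ f ih =>
    by_cases h0 : n = 0
    · simp [pvBinCore, h0]
    · rw [pvBinCore, if_neg h0]
      have hL : L ≠ 0 := by
        intro hL0; rw [hL0] at h; simp at h; omega
      obtain ⟨L', rfl⟩ : ∃ L', L = L' + 1 := ⟨L - 1, by omega⟩
      have : n / 2 < 2 ^ L' := by
        have := Nat.pow_succ 2 L'
        omega
      have := ih (n := n / 2) (L := L') (by omega) this
      simp only [List.length_append, List.length_cons, List.length_nil]
      omega

lemma pvBinCore_length_gt {f n L : Nat} (hf : n ≤ f) (h : 2 ^ L ≤ n) :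
    L < (pvBinCore f n).length := by
  induction f generalizing n L with
  | zero =>
    have := Nat.one_le_two_pow (n := L)
    omega
  | succ f ih =>
    have h0 : n ≠ 0 := by have := Nat.one_le_two_pow (n := L); omega
    rw [pvBinCore, if_neg h0]
    simp only [List.length_append, List.length_cons, List.length_nil]
    match L, h with
    | 0, _ => omega
    | L' + 1, h =>
      have : 2 ^ L' ≤ n / 2 := by
        have := Nat.pow_succ 2 L'
        omega
      have := ih (n := n / 2) (L := L') (by omega) this
      omega

lemma pvBinCore_no_b (f n : Nat) : 'b' ∉ pvBinCore f n := by
  induction f generalizing n with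
  | zero => simp [pvBinCore]
  | succ f ih =>
    by_cases h0 : n = 0
    · simp [pvBinCore, h0]
    · rw [pvBinCore, if_neg h0]
      intro hmem
      rcases List.mem_append.mp hmem with h | h
      · exact ih _ h
      · rcases List.mem_singleton.mp h with h
        split at h <;> simp_all

lemma pvBin_shape (a : Int) (h : a ≠ 0) :
    pvBin a = (if a < 0 then ['-', '0'] else ['0']) ++ 'b' :: (pvBinCore a.natAbs a.natAbs ++ []) := by
  rw [pvBin, if_neg h]
  split <;> simp

theorem main_spec (variavel : List Int) (a : Int) (s : Int)
    (hpre : (a = 0 → 0 < variavel.length + s.toNat) ∧ a.natAbs < 4 ^ (variavel.length + s.toNat))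
    (hnd : ¬ 2 ^ (variavel.length + s.toNat) ≤ a.natAbs) :
    mudancadevalor variavel a s = mudancadevalor_alt variavel a s := by
  rw [mudancadevalor, mudancadevalor_alt]
  rw [pvPadLoopA_eq]
  set padded := variavel ++ List.replicate s.toNat 0 with hpaddef
  have hplen : padded.length = variavel.length + s.toNat := by
    simp [hpaddef]
  set L := variavel.length + s.toNat with hLdef
  by_cases ha : a = 0
  · subst ha
    have hL1 : 0 < L := hpre.1 rfl
    have hbin : pvBin 0 = ['0'] ++ 'b' :: (['0'] ++ []) := by decide
    rw [hbin]
    have hmain := pvWriteLoopA_main ['0'] ['0'] [] padded ((padded.length : Int) - 1)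
      (by simp; omega) (by omega) (by decide)
    simp only [List.length_singleton] at hmain
    have hidx : (['0'] ++ 'b' :: (['0'] ++ [])).length - 1 = 1 + 1 := by decide
    rw [hidx, hmain]
    have h1 : ((padded.length : Int) - 1 + 1 - (1:Nat)).toNat = padded.length - 1 := by
      push_cast; omega
    have h2 : ((padded.length : Int) - 1 + 1).toNat = padded.length := by omega
    rw [h1, h2, List.drop_length]
    simp [pvBitsLSB, pvDigit]
  · have hn : a.natAbs ≠ 0 := by simpa using ha
    have hklt : a.natAbs < 2 ^ L := by omega
    have hk : (pvBinCore a.natAbs a.natAbs).length ≤ L := pvBinCore_length_le le_rfl hklt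
    have hk1 : 0 < (pvBinCore a.natAbs a.natAbs).length :=
      pvBinCore_length_gt le_rfl (by simpa using Nat.one_le_iff_ne_zero.mpr hn)
    set core := pvBinCore a.natAbs a.natAbs with hcoredef
    set pre0 : List Char := if a < 0 then ['-', '0'] else ['0'] with hpre0
    have hbin : pvBin a = pre0 ++ 'b' :: (core ++ []) := pvBin_shape a ha
    rw [hbin]
    have hidx : (pre0 ++ 'b' :: (core ++ [])).length - 1 = pre0.length + core.length := by
      simp
    have hmain := pvWriteLoopA_main pre0 core [] padded ((padded.length : Int) - 1)
      (by omega) (by omega) (pvBinCore_no_b _ _)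
    rw [hidx, hmain]
    have h1 : ((padded.length : Int) - 1 + 1 - (core.length : Int)).toNat = padded.length - core.length := by
      omega
    have h2 : ((padded.length : Int) - 1 + 1).toNat = padded.length := by omega
    rw [h1, h2, List.drop_length]
    have hrev : (pvBitsLSB a.natAbs a.natAbs).reverse = core.map pvDigit :=
      pvBitsLSB_reverse _ _ le_rfl
    rw [hrev]
    have hne : core.map pvDigit ≠ [] := by
      intro h; have := congrArg List.length h
      simp only [List.length_map, List.length_nil] at this; omega
    rw [if_neg hne]
    simp

theorem main_tight (variavel : List Int) (a : Int) (s : Int)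
    (hd : 2 ^ (variavel.length + s.toNat) ≤ a.natAbs) :
    mudancadevalor variavel a s ≠ mudancadevalor_alt variavel a s := by
  intro heq
  have hlen := congrArg List.length heq
  rw [mudancadevalor, mudancadevalor_alt, pvPadLoopA_eq] at hlen
  set padded := variavel ++ List.replicate s.toNat 0 with hpaddef
  have hplen : padded.length = variavel.length + s.toNat := by simp [hpaddef]
  set L := variavel.length + s.toNat with hLdef
  have hn : a.natAbs ≠ 0 := by
    have := Nat.one_le_two_pow (n := L); omega
  have hk : L < (pvBinCore a.natAbs a.natAbs).length := pvBinCore_length_gt le_rfl hd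
  set core := pvBinCore a.natAbs a.natAbs with hcoredef
  -- length of B's result is core.length
  have hrev : (pvBitsLSB a.natAbs a.natAbs).reverse = core.map pvDigit :=
    pvBitsLSB_reverse _ _ le_rfl
  have hne : (pvBitsLSB a.natAbs a.natAbs).reverse ≠ [] := by
    rw [hrev]; intro h; have := congrArg List.length h
    simp only [List.length_map, List.length_nil] at this; omega
  rw [if_neg hne] at hlen
  have hblen : (padded.take (padded.length - (pvBitsLSB a.natAbs a.natAbs).reverse.length) ++
      (pvBitsLSB a.natAbs a.natAbs).reverse).length = core.length := by
    have hc : (pvBitsLSB a.natAbs a.natAbs).reverse.length = core.length := by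
      rw [hrev]; simp
    simp only [List.length_append, List.length_take, hc]
    omega
  rw [hblen] at hlen
  -- length of A's result is padded.length = L, or 0 if the loop returned none
  rcases hA : pvWriteLoopA padded (pvBin a) ((pvBin a).length - 1) ((padded.length : Int) - 1)
    with _ | w
  · rw [hA] at hlen
    simp only [Option.getD_none, List.length_nil] at hlen
    omega
  · rw [hA] at hlen
    simp only [Option.getD_some] at hlen
    have := pvWriteLoopA_length hA
    omega

theorem mudancadevalor_spec : Claim_unchanged_mudancadevalor := by
  intro variavel a s _ hpre
  unfold Spec_mudancadevalor
  intro hnd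
  unfold Pre_mudancadevalor at hpre
  unfold D_mudancadevalor at hnd
  exact main_spec variavel a s hpre hnd

theorem mudancadevalor_changed : Claim_changed_mudancadevalor := by
  unfold Claim_changed_mudancadevalor; decide

theorem mudancadevalor_tight : Claim_exact_mudancadevalor := by
  intro variavel a s _ _ hd
  unfold D_mudancadevalor at hd
  exact main_tight variavel a s hd
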